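-- pv_equiv track=rewrite | github.com/kiwincardoza/leetcode_solutions | easy/1385_findTheDistanceValue.py | find_min_pos_num_index
-- ===== SOURCE A (Python) =====
-- from typing import List
--
-- def find_min_pos_num_index(arr2: List[int]) -> int:
--     if arr2[-1] < 0:
--         return -1
--     i = 0
--     while i < len(arr2):
--         if arr2[i] >= 0:
--             return i    # Return the first positive number's index
--         i += 1
-- ===== SOURCE B (Python) =====
-- from typing import List
--
-- def find_min_pos_num_index(arr2: List[int]) -> int:
--     # Reverse scan: walk the indices from the end down to 0 and remember the
--     # lowest non-negative position seen; an accumulator replaces A's early exit.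
--     if arr2[-1] < 0:
--         return -1
--     idx = -1
--     for i in range(len(arr2) - 1, -1, -1):
--         if arr2[i] >= 0:
--             idx = i
--     return idx
-- ===== Notes on version B (the rewrite author's own statement) =====
-- stated objective: alternative
-- what changed: A's forward scan with an early return is replaced by a backward full pass over range(len-1, -1, -1) that keeps the lowest non-negative index in an accumulator (last write wins).
import Mathlib
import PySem

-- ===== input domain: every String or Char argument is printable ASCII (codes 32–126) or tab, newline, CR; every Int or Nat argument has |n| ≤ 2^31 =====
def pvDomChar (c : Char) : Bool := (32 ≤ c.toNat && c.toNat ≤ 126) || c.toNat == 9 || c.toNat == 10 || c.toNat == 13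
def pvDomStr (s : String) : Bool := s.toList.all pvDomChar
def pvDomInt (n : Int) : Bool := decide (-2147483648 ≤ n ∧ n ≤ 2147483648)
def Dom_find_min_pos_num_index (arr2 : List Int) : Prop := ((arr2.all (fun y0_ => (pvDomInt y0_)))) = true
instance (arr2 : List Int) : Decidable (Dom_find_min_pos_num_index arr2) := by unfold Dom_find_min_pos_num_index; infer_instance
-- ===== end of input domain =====

-- B replaces A's forward early-exit scan by a backward full pass keeping the lowest
-- non-negative index in an accumulator; equivalence is proved for nonempty input.

-- ===== PORT A =====
-- the while loop: i walks the list; falling off the end is Python's implicit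
-- 'return None', unreachable inside Pre_ (when arr2[-1] ≥ 0 some element is ≥ 0);
-- 0 stands for that dead branch
def pvAgo : List Int → Nat → Int
  | [], _ => 0
  | x :: xs, i => if x ≥ 0 then (i : Int) else pvAgo xs (i + 1)

def find_min_pos_num_index (arr2 : List Int) : Int :=
  match PySem.List.pyGet? arr2 (-1) with
  | none => 0  -- IndexError on empty input, excluded by Pre_
  | some last => if last < 0 then -1 else pvAgo arr2 0

-- ===== PORT B =====
-- the 'for i in range(len(arr2) - 1, -1, -1)' loop of Source B; every index it
-- produces is in range, so pyGetD with default 0 is exact there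
def find_min_pos_num_index_alt (arr2 : List Int) : Int :=
  match PySem.List.pyGet? arr2 (-1) with
  | none => 0  -- IndexError on empty input, excluded by Pre_
  | some last =>
    if last < 0 then -1
    else
      (PySem.List.pyRange ((arr2.length : Int) - 1) (-1) (-1)).foldl
        (fun idx i => if PySem.List.pyGetD arr2 i 0 ≥ 0 then i else idx) (-1)

-- ===== PRECONDITION & SPEC =====
-- Pre_ excludes only the empty list, on which A raises IndexError (arr2[-1]).
def Pre_find_min_pos_num_index (arr2 : List Int) : Prop := arr2 ≠ []
instance (arr2 : List Int) : Decidable (Pre_find_min_pos_num_index arr2) := by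
  unfold Pre_find_min_pos_num_index; infer_instance
def pvWitness_find_min_pos_num_index : List Int := ([-3, 4, -1, 2])

def Spec_find_min_pos_num_index (arr2 : List Int) (out : Int) : Prop := out = find_min_pos_num_index_alt arr2
instance (arr2 : List Int) (out : Int) : Decidable (Spec_find_min_pos_num_index arr2 out) := by unfold Spec_find_min_pos_num_index; infer_instance

-- ===== CLAIM (what is proved, stated in full; the proofs are below) =====
def Claim_equal_find_min_pos_num_index : Prop := ∀ (arr2 : List Int), Dom_find_min_pos_num_index arr2 → Pre_find_min_pos_num_index arr2 → Spec_find_min_pos_num_index arr2 (find_min_pos_num_index arr2)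

-- ===== LEMMAS AND PROOFS =====

-- the descending index list [n-1, …, 1, 0], the value of range(n-1, -1, -1)
def pvDescList : Nat → List Int
  | 0 => []
  | n + 1 => (n : Int) :: pvDescList n

-- the position of the first non-negative element (the common specification)
def pvFirstNN : List Int → Option Nat
  | [] => none
  | x :: xs => if x ≥ 0 then some 0 else (pvFirstNN xs).map (· + 1)

theorem pvDescList_length (n : Nat) : (pvDescList n).length = n := by
  induction n with
  | zero => rfl
  | succ n ih => simp [pvDescList, ih]

theorem pvDescList_getElem (n k : Nat) (hk : k < n)
    (h : k < (pvDescList n).length) : (pvDescList n)[k] = (n : Int) - 1 - k := by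
  induction n generalizing k with
  | zero => omega
  | succ n ih =>
    cases k with
    | zero => simp [pvDescList]
    | succ k =>
      simp only [pvDescList, List.getElem_cons_succ]
      rw [ih k (by omega) (by simp [pvDescList_length]; omega)]
      push_cast
      ring

-- range(n-1, -1, -1) is exactly the descending index list
theorem pvRange_eq_descList (n : Nat) :
    PySem.List.pyRange ((n : Int) - 1) (-1) (-1) = pvDescList n := by
  apply List.ext_getElem
  · cases n with
    | zero => simp [PySem.List.pyRange, pvDescList]
    | succ m =>
      simp only [PySem.List.pyRange, pvDescList_length]
      norm_num
      omega
  · intro k h1 h2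
    cases n with
    | zero => simp [PySem.List.pyRange] at h1
    | succ m =>
      rw [pvDescList_getElem _ k (by rwa [pvDescList_length] at h2) h2]
      simp only [PySem.List.pyRange] at h1 ⊢
      norm_num at h1 ⊢
      omega

theorem pvFirstNN_append_singleton (xs : List Int) (x : Int) :
    pvFirstNN (xs ++ [x]) =
      match pvFirstNN xs with
      | some j => some j
      | none => if x ≥ 0 then some xs.length else none := by
  induction xs with
  | nil => simp [pvFirstNN]
  | cons y ys ih =>
    by_cases hy : y ≥ 0
    · simp [pvFirstNN, hy]
    · simp only [List.cons_append, pvFirstNN, if_neg hy, ih]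
      cases pvFirstNN ys with
      | some j => simp
      | none =>
        by_cases hx : x ≥ 0
        · simp [hx]
        · simp [hx]

theorem pvFirstNN_eq_none (xs : List Int) :
    pvFirstNN xs = none ↔ ∀ x ∈ xs, x < 0 := by
  induction xs with
  | nil => simp [pvFirstNN]
  | cons y ys ih =>
    by_cases hy : y ≥ 0
    · simp [pvFirstNN, hy]
    · simp [pvFirstNN, hy, ih]; omega

-- A's scan, started at counter i, lands on the first non-negative position
theorem pvAgo_firstNN (xs : List Int) (i n : Nat) (h : pvFirstNN xs = some n) :
    pvAgo xs i = ((i + n : Nat) : Int) := by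
  induction xs generalizing i n with
  | nil => simp [pvFirstNN] at h
  | cons x xs ih =>
    by_cases hx : x ≥ 0
    · simp only [pvFirstNN, if_pos hx, Option.some.injEq] at h
      simp [pvAgo, hx, ← h]
    · simp only [pvFirstNN, if_neg hx, Option.map_eq_some_iff] at h
      obtain ⟨m, hm, rfl⟩ := h
      simp only [pvAgo, if_neg hx]
      rw [ih (i + 1) m hm]
      congr 1
      omega

-- B's backward fold over the indices n-1 … 0 returns the first non-negative
-- position among the first n elements, or the accumulator if there is none
theorem pvFold_descList (arr2 : List Int) (n : Nat) (hn : n ≤ arr2.length) (acc : Int) :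
    (pvDescList n).foldl
        (fun idx i => if PySem.List.pyGetD arr2 i 0 ≥ 0 then i else idx) acc =
      match pvFirstNN (arr2.take n) with
      | some j => (j : Int)
      | none => acc := by
  induction n generalizing acc with
  | zero => simp [pvDescList, pvFirstNN]
  | succ n ih =>
    have hlt : n < arr2.length := by omega
    have htake : arr2.take (n + 1) = arr2.take n ++ [arr2[n]] := by
      rw [List.take_add_one]
      simp [List.getElem?_eq_getElem hlt]
    simp only [pvDescList, List.foldl_cons]
    rw [ih (by omega), htake, pvFirstNN_append_singleton]
    have hget : PySem.List.pyGetD arr2 (n : Int) 0 = arr2[n] := by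
      rw [PySem.List.pyGetD_natCast]
      simp [List.getD, List.getElem?_eq_getElem hlt]
    cases hf : pvFirstNN (arr2.take n) with
    | some j => simp
    | none =>
      by_cases hx : arr2[n] ≥ 0
      · simp [hget, hx, List.length_take, Nat.min_eq_left (le_of_lt hlt)]
      · simp [hget, hx]

-- ===== VERDICT (by name: the statement is the Claim_ definition above) =====
theorem find_min_pos_num_index_spec : Claim_equal_find_min_pos_num_index := by
  intro arr2 _ hne
  unfold Spec_find_min_pos_num_index find_min_pos_num_index find_min_pos_num_index_alt
  cases hg : PySem.List.pyGet? arr2 (-1) with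
  | none =>
    exact absurd (by simpa [PySem.List.pyGet?_neg_one, List.getLast?_eq_none_iff] using hg) hne
  | some last =>
    by_cases hl : last < 0
    · simp [hl]
    · simp only [if_neg hl]
      rw [PySem.List.pyGet?_neg_one] at hg
      have hmem : last ∈ arr2 := List.mem_of_getLast? hg
      have hsome : pvFirstNN arr2 ≠ none := fun hnone =>
        hl ((pvFirstNN_eq_none arr2).1 hnone last hmem)
      obtain ⟨j, hj⟩ := Option.ne_none_iff_exists'.1 hsome
      rw [pvRange_eq_descList, pvFold_descList arr2 arr2.length le_rfl (-1),
        List.take_length, hj, pvAgo_firstNN arr2 0 j hj]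
      simp
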